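-- pv_equiv track=rewrite | github.com/convyares-FCSL/AdventOfCode | advent/day04.py | run_logic
-- ===== SOURCE A (Python) =====
-- def run_logic(data: list[str], task: int, debug: bool = False, bucket_size: int = 12) -> int:
--     result = 0
--
--     match task:
--         case 1:
--             accessible_rolls = find_accessible_rolls(data)
--             result = len(accessible_rolls)
--
--         case 2:
--             total_removed = 0
--             current_data = data.copy()
--
--             while True:
--                 removed_this_round = 0
--                 next_data: list[str] = []
--
--                 # Get all accessible rolls for the current grid
--                 accessible_rolls = set(find_accessible_rolls(current_data))
--
--                 # Remove accessible rolls
--                 for row in range(len(current_data)):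
--                     row_chars = list(current_data[row])
--
--                     for column in range(len(row_chars)):
--                         if (row, column) in accessible_rolls:
--                             # This roll is accessible: remove it
--                             row_chars[column] = '.'
--                             removed_this_round += 1
--
--                     next_data.append("".join(row_chars))
--
--                 if removed_this_round == 0:
--                     break
--
--                 total_removed += removed_this_round
--                 current_data = next_data
--
--             result = total_removed
--
--     return result
--
-- def find_accessible_rolls(grid: list[str]) -> list[tuple[int, int]]:
--     accessible: list[tuple[int, int]] = []
--
--     for row in range(len(grid)):
--         for column in range(len(grid[row])):
--             if grid[row][column] == '@':
--                 adjacent_rolls = count_adjacent_rolls(grid, row, column)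
--                 if adjacent_rolls < 4:
--                     accessible.append((row, column))
--
--     return accessible
--
-- def count_adjacent_rolls(data, row, column) -> int:
--     current_roll = 0
--     offsets = [(-1, -1), (-1, 0), (-1, 1),( 0, -1),( 0, 1),( 1, -1), ( 1, 0),  ( 1, 1)]
--
--     for row_offset, column_offset in offsets:
--         neighbour_row = row + row_offset
--         neighbour_column = column + column_offset
--
--         # Stay inside grid bounds
--         if 0 <= neighbour_row < len(data) and 0 <= neighbour_column < len(data[neighbour_row]):
--             if data[neighbour_row][neighbour_column] == '@':
--                 current_roll += 1
--
--     return current_roll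
-- ===== SOURCE B (Python) =====
-- def run_logic(data: list[str], task: int, debug: bool = False, bucket_size: int = 12) -> int:
--     # Work on the coordinate list of '@' cells instead of rebuilding string grids each round.
--     offsets = [(-1, -1), (-1, 0), (-1, 1), (0, -1), (0, 1), (1, -1), (1, 0), (1, 1)]
--     rolls = [(r, c) for r, line in enumerate(data) for c, ch in enumerate(line) if ch == '@']
--
--     def few_neighbours(s, r, c):
--         n = 0
--         for dr, dc in offsets:
--             if (r + dr, c + dc) in s:
--                 n += 1
--         return n < 4
--
--     if task == 1:
--         s = set(rolls)
--         return sum(1 for (r, c) in rolls if few_neighbours(s, r, c))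
--
--     if task == 2:
--         total = 0
--         while rolls:
--             s = set(rolls)
--             keep = [(r, c) for (r, c) in rolls if not few_neighbours(s, r, c)]
--             removed = len(rolls) - len(keep)
--             if removed == 0:
--                 break
--             total += removed
--             rolls = keep
--         return total
--
--     return 0
-- ===== Notes on version B (the rewrite author's own statement) =====
-- stated objective: alternative
-- what changed: B extracts the '@' coordinates once and peels rounds on that coordinate list with a hash-set neighbour test, instead of re-scanning the whole grid and rebuilding every row string in each round as A does.
import Mathlib
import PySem

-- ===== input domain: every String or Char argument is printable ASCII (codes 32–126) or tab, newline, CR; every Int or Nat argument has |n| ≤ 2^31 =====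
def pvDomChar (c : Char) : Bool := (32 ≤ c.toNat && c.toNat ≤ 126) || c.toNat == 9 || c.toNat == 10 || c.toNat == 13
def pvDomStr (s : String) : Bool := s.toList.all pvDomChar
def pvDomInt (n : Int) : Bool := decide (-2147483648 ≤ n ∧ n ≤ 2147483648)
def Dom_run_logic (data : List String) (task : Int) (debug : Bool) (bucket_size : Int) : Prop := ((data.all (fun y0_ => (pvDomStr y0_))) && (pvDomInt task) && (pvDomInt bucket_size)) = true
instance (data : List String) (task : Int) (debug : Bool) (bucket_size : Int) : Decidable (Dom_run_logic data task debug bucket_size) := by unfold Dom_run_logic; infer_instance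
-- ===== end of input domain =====

-- B replaces A's repeated whole-grid rescans and string rebuilding by round-based
-- peeling of the list of '@' coordinates with a hash-set neighbour test (objective:
-- alternative algorithm/data structure, not measured faster).

-- ===== PORT A =====
-- literal transliteration of Source A; the `while True` loop of task 2 is run with the
-- fuel `pvSumLen data + 1`, a totality guard only: each productive round removes at
-- least one '@' so at most pvSumLen productive rounds plus one final round occur.

def pvOffsets : List (Int × Int) :=
  [(-1,-1),(-1,0),(-1,1),(0,-1),(0,1),(1,-1),(1,0),(1,1)]

-- list(grid[row]) for a Nat row index (the row loops of A run over range(len(grid)))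
def pvRowChars (g : List String) (r : Nat) : List Char := ((g[r]?).map String.toList).getD []

-- len(data[r]) for an Int index (only consulted by A under 0 ≤ r < len(data))
def pvRowLenI (data : List String) (r : Int) : Int :=
  ((PySem.List.pyGet? data r).map (fun s => (s.toList.length : Int))).getD 0

-- data[r][c] (only consulted by A under the bounds guard)
def pvCharAt (data : List String) (r c : Int) : Option Char :=
  (PySem.List.pyGet? data r).bind (fun s => PySem.List.pyGet? s.toList c)

def count_adjacent_rolls (data : List String) (row column : Int) : Int :=
  pvOffsets.foldl (fun cur o =>
    let nr := row + o.1
    let nc := column + o.2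
    if 0 ≤ nr ∧ nr < (data.length : Int) ∧ 0 ≤ nc ∧ nc < pvRowLenI data nr then
      if pvCharAt data nr nc = some '@' then cur + 1 else cur
    else cur) 0

def find_accessible_rolls (grid : List String) : List (Int × Int) :=
  (List.range grid.length).foldl (fun acc row =>
    (List.range (pvRowChars grid row).length).foldl (fun acc2 (col : Nat) =>
      if pvCharAt grid (row : Int) (col : Int) = some '@' then
        if count_adjacent_rolls grid (row : Int) (col : Int) < 4 then
          acc2 ++ [((row : Int), (col : Int))]
        else acc2
      else acc2) acc) []

-- one iteration of A's while-loop body: (removed_this_round, next_data)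
def pvRound (cur : List String) : Int × List String :=
  let acc := PySem.Set.ofList (find_accessible_rolls cur)
  (List.range cur.length).foldl (fun (st : Int × List String) row =>
    let inner := (List.range (pvRowChars cur row).length).foldl
      (fun (p : List Char × Int) (col : Nat) =>
        if PySem.Set.contains acc ((row : Int), (col : Int)) then (p.1.set col '.', p.2 + 1)
        else p)
      (pvRowChars cur row, st.1)
    (inner.2, st.2 ++ [String.ofList inner.1])) (0, [])

def pvSumLen (data : List String) : Nat := (data.map (fun s => s.toList.length)).sum

def pvLoopA (fuel : Nat) (cur : List String) (total : Int) : Int :=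
  match fuel with
  | 0 => total
  | f + 1 =>
    let r := pvRound cur
    if r.1 = 0 then total else pvLoopA f r.2 (total + r.1)

def run_logic (data : List String) (task : Int) (debug : Bool) (bucket_size : Int) : Int :=
  if task = 1 then ((find_accessible_rolls data).length : Int)
  else if task = 2 then pvLoopA (pvSumLen data + 1) data 0
  else 0

-- ===== PORT B =====
-- transliteration of Source B; the `while rolls` loop gets the same totality fuel.

def rollsOf (data : List String) : List (Int × Int) :=
  (PySem.List.enumerate data 0).flatMap (fun rl =>
    (PySem.List.enumerate rl.2.toList 0).flatMap (fun cch =>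
      if cch.2 = '@' then [(rl.1, cch.1)] else []))

def nbrCount (s : List (Int × Int)) (r c : Int) : Int :=
  pvOffsets.foldl (fun n o =>
    if PySem.Set.contains s (r + o.1, c + o.2) then n + 1 else n) 0

def fewNbrs (s : List (Int × Int)) (r c : Int) : Bool := decide (nbrCount s r c < 4)

def pvPeel (fuel : Nat) (rolls : List (Int × Int)) (total : Int) : Int :=
  match fuel with
  | 0 => total
  | f + 1 =>
    if rolls = [] then total
    else
      let s := PySem.Set.ofList rolls
      let keep := rolls.filter (fun p => !fewNbrs s p.1 p.2)
      let removed : Int := (rolls.length : Int) - (keep.length : Int)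
      if removed = 0 then total else pvPeel f keep (total + removed)

def run_logic_alt (data : List String) (task : Int) (debug : Bool) (bucket_size : Int) : Int :=
  let rolls := rollsOf data
  if task = 1 then
    ((rolls.filter (fun p => fewNbrs (PySem.Set.ofList rolls) p.1 p.2)).length : Int)
  else if task = 2 then pvPeel (pvSumLen data + 1) rolls 0
  else 0

-- ===== PRECONDITION & SPEC =====
def Spec_run_logic (data : List String) (task : Int) (debug : Bool) (bucket_size : Int) (out : Int) : Prop := out = run_logic_alt data task debug bucket_size
instance (data : List String) (task : Int) (debug : Bool) (bucket_size : Int) (out : Int) : Decidable (Spec_run_logic data task debug bucket_size out) := by unfold Spec_run_logic; infer_instance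

-- ===== CLAIM (what is proved, stated in full; the proofs are below) =====
def Claim_equal_run_logic : Prop := ∀ (data : List String) (task : Int) (debug : Bool) (bucket_size : Int), Dom_run_logic data task debug bucket_size → Spec_run_logic data task debug bucket_size (run_logic data task debug bucket_size)

-- ===== LEMMAS AND PROOFS =====

-- widths of the grid rows, char at a cell (default-padded), '@'-test
def pvWs (g : List String) : List Nat := g.map (fun s => s.toList.length)
def pvAtD (g : List String) (i j : Nat) : Char := (pvRowChars g i).getD j ' '
def pvChr (g : List String) (i j : Nat) : Bool := decide (pvAtD g i j = '@')

-- row-major cells (i, j) of a grid shape satisfying P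
def pvCells (W : List Nat) (P : Nat → Nat → Bool) : List (Int × Int) :=
  (List.range W.length).flatMap (fun i =>
    ((List.range (W.getD i 0)).filter (fun j => P i j)).map (fun (j : Nat) => ((i : Int), (j : Int))))

theorem pv_ws_length (g : List String) : (pvWs g).length = g.length := by
  simp [pvWs]

theorem pv_rowChars_getD (g : List String) (i : Nat) :
    pvRowChars g i = (g.getD i "").toList := by
  simp only [pvRowChars, List.getD]
  cases g[i]? <;> simp

theorem pv_ws_getD (g : List String) (i : Nat) :
    (pvWs g).getD i 0 = (pvRowChars g i).length := by
  simp only [pvWs, List.getD, List.getElem?_map, pvRowChars]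
  cases g[i]? <;> simp

theorem pv_flatMap_ite {α β : Type} (l : List α) (p : α → Prop) [DecidablePred p] (f : α → β) :
    l.flatMap (fun x => if p x then [f x] else []) = (l.filter (fun x => decide (p x))).map f := by
  induction l with
  | nil => simp
  | cons x t ih => by_cases h : p x <;> simp [h, ih]

theorem pv_filter_flatMap {α β : Type} (l : List α) (f : α → List β) (q : β → Bool) :
    (l.flatMap f).filter q = l.flatMap (fun x => (f x).filter q) := by
  induction l with
  | nil => simp
  | cons x t ih => simp [List.filter_append, ih]

theorem pv_flatMap_congr {α β : Type} (l : List α) (f g : α → List β)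
    (h : ∀ x ∈ l, f x = g x) : l.flatMap f = l.flatMap g := by
  induction l with
  | nil => simp
  | cons x t ih =>
    simp only [List.flatMap_cons]
    rw [h x (List.mem_cons_self), ih (fun y hy => h y (List.mem_cons_of_mem _ hy))]

theorem pv_enum_flatMap {α β : Type} (xs : List α) (d : α) (s : Int) (f : Int → α → List β) :
    (PySem.List.enumerate xs s).flatMap (fun p => f p.1 p.2)
      = (List.range xs.length).flatMap (fun (i : Nat) => f (s + (i : Int)) (xs.getD i d)) := by
  induction xs generalizing s with
  | nil => simp [PySem.List.enumerate_nil]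
  | cons x t ih =>
    have hr : List.range (t.length + 1) = 0 :: (List.range t.length).map (· + 1) := by
      simpa [Nat.succ_eq_add_one] using List.range_succ_eq_map (n := t.length)
    simp only [PySem.List.enumerate_cons, List.flatMap_cons, List.length_cons, hr,
      List.flatMap_map]
    rw [ih (s + 1)]
    simp only [List.getD_cons_zero, List.getD_cons_succ, Nat.cast_zero, add_zero]
    congr 1
    apply pv_flatMap_congr
    intro i _
    congr 1
    push_cast
    ring

theorem pv_rollsOf_eq (g : List String) : rollsOf g = pvCells (pvWs g) (pvChr g) := by
  unfold rollsOf pvCells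
  rw [pv_enum_flatMap (d := "") (f := fun r line =>
    (PySem.List.enumerate line.toList 0).flatMap (fun cch =>
      if cch.2 = '@' then [(r, cch.1)] else []))]
  rw [pv_ws_length]
  apply pv_flatMap_congr
  intro i _
  rw [pv_enum_flatMap (d := ' ') (f := fun c ch =>
    if ch = '@' then [((0 : Int) + (i : Int), c)] else [])]
  rw [pv_flatMap_ite _ (fun j => (g.getD i "").toList.getD j ' ' = '@')
    (fun (j : Nat) => ((0 : Int) + (i : Int), (0 : Int) + (j : Int)))]
  have hw : (pvWs g).getD i 0 = (g.getD i "").toList.length := by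
    rw [pv_ws_getD, pv_rowChars_getD]
  have hc : ∀ j, pvChr g i j = decide ((g.getD i "").toList.getD j ' ' = '@') := by
    intro j
    simp [pvChr, pvAtD, pv_rowChars_getD]
  rw [hw, List.filter_congr (fun j _ => (hc j).symm)]
  simp only [zero_add]

theorem pv_mem_cells (W : List Nat) (P : Nat → Nat → Bool) (p : Int × Int) :
    p ∈ pvCells W P ↔ ∃ i j : Nat, i < W.length ∧ j < W.getD i 0 ∧ P i j = true ∧ p = ((i : Int), (j : Int)) := by
  simp only [pvCells, List.mem_flatMap, List.mem_range, List.mem_map, List.mem_filter]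
  aesop

theorem pv_cells_congr (W : List Nat) (P Q : Nat → Nat → Bool)
    (h : ∀ i j, i < W.length → j < W.getD i 0 → P i j = Q i j) :
    pvCells W P = pvCells W Q := by
  unfold pvCells
  apply pv_flatMap_congr
  intro i hi
  rw [List.filter_congr (fun j hj => h i j (List.mem_range.mp hi) (List.mem_range.mp hj))]

theorem pv_filter_cells (W : List Nat) (P : Nat → Nat → Bool) (q : Int × Int → Bool) :
    (pvCells W P).filter q = pvCells W (fun i j => P i j && q ((i : Int), (j : Int))) := by
  unfold pvCells
  rw [pv_filter_flatMap]
  apply pv_flatMap_congr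
  intro i _
  rw [List.filter_map, List.filter_filter]
  congr 1
  apply List.filter_congr
  intro j _
  simp [Bool.and_comm]

theorem pv_length_cells (W : List Nat) (P : Nat → Nat → Bool) :
    (pvCells W P).length
      = ((List.range W.length).map (fun i => ((List.range (W.getD i 0)).filter (fun j => P i j)).length)).sum := by
  simp [pvCells, List.length_flatMap]

theorem pv_charAt_nat (g : List String) (i j : Nat) :
    pvCharAt g (i : Int) (j : Int) = (pvRowChars g i)[j]? := by
  simp only [pvCharAt, PySem.List.pyGet?_natCast, pvRowChars]
  cases h : g[i]? <;> simp [h]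

theorem pv_charAt_iff (g : List String) (i j : Nat) :
    pvCharAt g (i : Int) (j : Int) = some '@' ↔ (j < (pvRowChars g i).length ∧ pvAtD g i j = '@') := by
  rw [pv_charAt_nat, List.getElem?_eq_some_iff]
  constructor
  · rintro ⟨h, hc⟩
    refine ⟨h, ?_⟩
    simp only [pvAtD]
    rw [List.getD_eq_getElem _ _ h]
    exact hc
  · rintro ⟨h, hc⟩
    refine ⟨h, ?_⟩
    simp only [pvAtD] at hc
    rwa [List.getD_eq_getElem _ _ h] at hc

theorem pv_mem_rollsOf (g : List String) (p : Int × Int) :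
    p ∈ rollsOf g ↔ ∃ i j : Nat, i < g.length ∧ j < (pvRowChars g i).length ∧ pvAtD g i j = '@' ∧ p = ((i : Int), (j : Int)) := by
  rw [pv_rollsOf_eq, pv_mem_cells]
  simp only [pv_ws_length, pv_ws_getD, pvChr, decide_eq_true_eq]

theorem pv_rowLenI_nat (g : List String) (i : Nat) (h : i < g.length) :
    pvRowLenI g (i : Int) = ((pvRowChars g i).length : Int) := by
  simp [pvRowLenI, pvRowChars, PySem.List.pyGet?_natCast, List.getElem?_eq_getElem h]

theorem pv_Acond_iff (g : List String) (r c : Int) :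
    (0 ≤ r ∧ r < (g.length : Int) ∧ 0 ≤ c ∧ c < pvRowLenI g r ∧ pvCharAt g r c = some '@')
      ↔ (r, c) ∈ rollsOf g := by
  constructor
  · rintro ⟨h0, h1, h2, h3, h4⟩
    have hr : ((r.toNat : Nat) : Int) = r := Int.toNat_of_nonneg h0
    have hc : ((c.toNat : Nat) : Int) = c := Int.toNat_of_nonneg h2
    have hi : r.toNat < g.length := by omega
    rw [← hr, ← hc] at h4
    rw [← hr, pv_rowLenI_nat g r.toNat hi] at h3
    have hj : c.toNat < (pvRowChars g r.toNat).length := by omega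
    obtain ⟨-, hAt⟩ := (pv_charAt_iff g r.toNat c.toNat).mp h4
    exact (pv_mem_rollsOf g (r, c)).mpr ⟨r.toNat, c.toNat, hi, hj, hAt, by rw [hr, hc]⟩
  · intro hm
    obtain ⟨i, j, hi, hj, hAt, hp⟩ := (pv_mem_rollsOf g (r, c)).mp hm
    obtain ⟨hr, hc⟩ := Prod.mk.injEq .. ▸ hp
    subst hr; subst hc
    refine ⟨Int.natCast_nonneg _, by exact_mod_cast hi, Int.natCast_nonneg _, ?_, ?_⟩
    · rw [pv_rowLenI_nat g i hi]; exact_mod_cast hj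
    · exact (pv_charAt_iff g i j).mpr ⟨hj, hAt⟩

theorem pv_countAdj_eq (g : List String) (r c : Int) :
    count_adjacent_rolls g r c = nbrCount (PySem.Set.ofList (rollsOf g)) r c := by
  unfold count_adjacent_rolls nbrCount
  apply PySem.List.foldl_congr_mem
  intro acc o _
  dsimp only
  by_cases hm : ((r + o.1, c + o.2) : Int × Int) ∈ rollsOf g
  · have hcont : PySem.Set.contains (PySem.Set.ofList (rollsOf g)) (r + o.1, c + o.2) = true := by
      rw [PySem.Set.contains_iff]
      exact (PySem.Set.mem_ofList _ _).mpr hm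
    obtain ⟨h0, h1, h2, h3, h4⟩ := (pv_Acond_iff g _ _).mpr hm
    rw [if_pos ⟨h0, h1, h2, h3⟩, if_pos h4, if_pos hcont]
  · have hcont : ¬ (PySem.Set.contains (PySem.Set.ofList (rollsOf g)) (r + o.1, c + o.2) = true) := by
      rw [PySem.Set.contains_iff, PySem.Set.mem_ofList]
      exact hm
    rw [if_neg hcont]
    split_ifs with hb hch
    · exact absurd ((pv_Acond_iff g _ _).mp ⟨hb.1, hb.2.1, hb.2.2.1, hb.2.2.2, hch⟩) hm
    · rfl
    · rfl

theorem pv_findAcc_cells (g : List String) :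
    find_accessible_rolls g
      = pvCells (pvWs g) (fun i j => pvChr g i j && fewNbrs (PySem.Set.ofList (rollsOf g)) (i : Int) (j : Int)) := by
  unfold find_accessible_rolls
  have hin : ∀ (acc : List (Int × Int)) (row : Nat), row ∈ List.range g.length →
      (List.range (pvRowChars g row).length).foldl (fun acc2 (col : Nat) =>
        if pvCharAt g (row : Int) (col : Int) = some '@' then
          if count_adjacent_rolls g (row : Int) (col : Int) < 4 then
            acc2 ++ [((row : Int), (col : Int))]
          else acc2
        else acc2) acc
      = acc ++ ((List.range (pvRowChars g row).length).filter (fun col =>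
          pvChr g row col && fewNbrs (PySem.Set.ofList (rollsOf g)) (row : Int) (col : Int))).map
            (fun (col : Nat) => ((row : Int), (col : Int))) := by
    intro acc row _
    have hstep : ∀ (acc2 : List (Int × Int)) (col : Nat), col ∈ List.range (pvRowChars g row).length →
        (if pvCharAt g (row : Int) (col : Int) = some '@' then
          if count_adjacent_rolls g (row : Int) (col : Int) < 4 then
            acc2 ++ [((row : Int), (col : Int))]
          else acc2
         else acc2)
        = (if (pvCharAt g (row : Int) (col : Int) = some '@' ∧ count_adjacent_rolls g (row : Int) (col : Int) < 4) then
            acc2 ++ [((row : Int), (col : Int))] else acc2) := by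
      intro acc2 col _
      by_cases h1 : pvCharAt g (row : Int) (col : Int) = some '@' <;>
        by_cases h2 : count_adjacent_rolls g (row : Int) (col : Int) < 4 <;>
        simp [h1, h2]
    refine (PySem.List.foldl_congr_mem _ _ _ acc hstep).trans ?_
    rw [PySem.List.foldl_append_ite (p := fun col : Nat =>
        pvCharAt g (row : Int) (col : Int) = some '@' ∧ count_adjacent_rolls g (row : Int) (col : Int) < 4)
        (f := fun (col : Nat) => ((row : Int), (col : Int)))]
    congr 1
    congr 1
    apply List.filter_congr
    intro col hcol
    have hlt : col < (pvRowChars g row).length := List.mem_range.mp hcol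
    have h1 : (pvCharAt g (row : Int) (col : Int) = some '@') ↔ (pvAtD g row col = '@') := by
      rw [pv_charAt_iff]
      exact ⟨fun h => h.2, fun h => ⟨hlt, h⟩⟩
    simp only [pvChr, fewNbrs, ← pv_countAdj_eq, Bool.decide_and]
    rw [decide_eq_decide.mpr h1]
  refine ((PySem.List.foldl_congr_mem _ _ _ ([] : List (Int × Int)) hin).trans ?_)
  rw [PySem.List.foldl_append_eq_flatMap, List.nil_append]
  unfold pvCells
  rw [pv_ws_length]
  apply pv_flatMap_congr
  intro i _
  rw [pv_ws_getD]

theorem pv_findAcc_eq (g : List String) :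
    find_accessible_rolls g
      = (rollsOf g).filter (fun p => fewNbrs (PySem.Set.ofList (rollsOf g)) p.1 p.2) := by
  conv_rhs => rw [pv_rollsOf_eq, pv_filter_cells]
  rw [pv_findAcc_cells, ← pv_rollsOf_eq]

theorem pv_pair_foldl {α β γ : Type} (l : List γ) (f : α → γ → α) (g : β → γ → β) (a : α) (b : β) :
    l.foldl (fun p x => (f p.1 x, g p.2 x)) (a, b) = (l.foldl f a, l.foldl g b) := by
  induction l generalizing a b with
  | nil => rfl
  | cons x t ih => simpa using ih (f a x) (g b x)

theorem pv_cast_sum (l : List Nat) : ((l.sum : Nat) : Int) = (l.map (fun (n : Nat) => (n : Int))).sum := by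
  induction l with
  | nil => simp
  | cons x t ih => simp [ih]

theorem pv_filter_split {α : Type} (l : List α) (p : α → Bool) :
    (l.filter p).length + (l.filter (fun x => !p x)).length = l.length := by
  induction l with
  | nil => simp
  | cons x t ih => by_cases h : p x <;> simp [h] <;> omega

theorem pv_setfold_length (L : List Nat) (q : Nat → Bool) (cs : List Char) :
    (L.foldl (fun l i => if q i then l.set i '.' else l) cs).length = cs.length := by
  induction L generalizing cs with
  | nil => rfl
  | cons i t ih =>
    simp only [List.foldl_cons]
    rw [ih]
    by_cases h : q i <;> simp [h]

theorem pv_setfold_getD (L : List Nat) (q : Nat → Bool) (cs : List Char) (j : Nat) :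
    ((L.foldl (fun l i => if q i then l.set i '.' else l) cs).getD j ' ')
      = if j ∈ L ∧ q j = true ∧ j < cs.length then '.' else cs.getD j ' ' := by
  induction L generalizing cs with
  | nil => simp
  | cons i t ih =>
    simp only [List.foldl_cons]
    rw [ih]
    by_cases hq : q i
    · simp only [if_pos hq, List.length_set]
      by_cases hij : i = j
      · subst hij
        by_cases hlen : i < cs.length
        · by_cases hmem : i ∈ t
          · simp [hmem, hq, hlen, List.getD_eq_getElem?_getD, List.getElem?_set, List.mem_cons]
          · simp [hmem, hq, hlen, List.getD_eq_getElem?_getD, List.getElem?_set, List.mem_cons]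
        · rw [List.set_eq_of_length_le (Nat.le_of_not_lt hlen)]
          rw [if_neg (fun h => hlen h.2.2), if_neg (fun h => hlen h.2.2)]
      · have hset : (cs.set i '.').getD j ' ' = cs.getD j ' ' := by
          simp [List.getD_eq_getElem?_getD, List.getElem?_set, hij]
        rw [hset]
        by_cases h1 : j ∈ t ∧ q j = true ∧ j < cs.length
        · rw [if_pos h1, if_pos ⟨List.mem_cons_of_mem _ h1.1, h1.2⟩]
        · rw [if_neg h1, if_neg ?_]
          rintro ⟨hm, hrest⟩
          rcases List.mem_cons.mp hm with h | h
          · exact hij h.symm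
          · exact h1 ⟨h, hrest⟩
    · simp only [if_neg hq]
      by_cases h1 : j ∈ t ∧ q j = true ∧ j < cs.length
      · rw [if_pos h1, if_pos ⟨List.mem_cons_of_mem _ h1.1, h1.2⟩]
      · rw [if_neg h1, if_neg ?_]
        rintro ⟨hm, hrest⟩
        rcases List.mem_cons.mp hm with h | h
        · subst h
          exact hq (by simpa using hrest.1)
        · exact h1 ⟨h, hrest⟩

def pvMask (cur : List String) (row : Nat) : List Char :=
  (List.range (pvRowChars cur row).length).foldl
    (fun l (col : Nat) =>
      if PySem.Set.contains (PySem.Set.ofList (find_accessible_rolls cur)) ((row : Int), (col : Int)) then l.set col '.'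
      else l)
    (pvRowChars cur row)

def pvCnt (cur : List String) (row : Nat) : Nat :=
  (List.range (pvRowChars cur row).length).countP
    (fun (col : Nat) => PySem.Set.contains (PySem.Set.ofList (find_accessible_rolls cur)) ((row : Int), (col : Int)))

theorem pv_round_eq (cur : List String) :
    pvRound cur = (((List.range cur.length).map (fun row => (pvCnt cur row : Int))).sum,
      (List.range cur.length).map (fun (row : Nat) => String.ofList (pvMask cur row))) := by
  unfold pvRound
  show (List.range cur.length).foldl _ ((0 : Int), ([] : List String)) = _
  have hstep : ∀ (st : Int × List String), ∀ row ∈ List.range cur.length,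
      (fun (st : Int × List String) (row : Nat) =>
        let inner := (List.range (pvRowChars cur row).length).foldl
          (fun (p : List Char × Int) (col : Nat) =>
            if PySem.Set.contains (PySem.Set.ofList (find_accessible_rolls cur)) ((row : Int), (col : Int)) then
              (p.1.set col '.', p.2 + 1)
            else p)
          (pvRowChars cur row, st.1)
        (inner.2, st.2 ++ [String.ofList inner.1])) st row
      = (st.1 + (pvCnt cur row : Int), st.2 ++ [String.ofList (pvMask cur row)]) := by
    intro st row _
    have hcomp : ∀ (p : List Char × Int), ∀ col ∈ List.range (pvRowChars cur row).length,
        (if PySem.Set.contains (PySem.Set.ofList (find_accessible_rolls cur)) ((row : Int), (col : Int)) then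
          (p.1.set col '.', p.2 + 1)
         else p)
        = ((if PySem.Set.contains (PySem.Set.ofList (find_accessible_rolls cur)) ((row : Int), (col : Int)) then p.1.set col '.' else p.1),
           (if PySem.Set.contains (PySem.Set.ofList (find_accessible_rolls cur)) ((row : Int), (col : Int)) then p.2 + 1 else p.2)) := by
      intro p col _
      split_ifs <;> rfl
    show (let inner := _; ((inner : List Char × Int).2, st.2 ++ [String.ofList inner.1])) = _
    simp only
    rw [PySem.List.foldl_congr_mem _ _ _ (pvRowChars cur row, st.1) hcomp]
    rw [pv_pair_foldl (List.range (pvRowChars cur row).length)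
      (fun (l : List Char) (col : Nat) =>
        if PySem.Set.contains (PySem.Set.ofList (find_accessible_rolls cur)) ((row : Int), (col : Int)) then l.set col '.' else l)
      (fun (n : Int) (col : Nat) =>
        if PySem.Set.contains (PySem.Set.ofList (find_accessible_rolls cur)) ((row : Int), (col : Int)) then n + 1 else n)
      (pvRowChars cur row) st.1]
    refine Prod.ext ?_ ?_
    · show (List.range (pvRowChars cur row).length).foldl _ st.1 = st.1 + (pvCnt cur row : Int)
      rw [PySem.List.foldl_ite_add_one (p := fun (col : Nat) =>
        PySem.Set.contains (PySem.Set.ofList (find_accessible_rolls cur)) ((row : Int), (col : Int)) = true)]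
      congr 2
      apply List.countP_congr
      intro col _
      simp
    · rfl
  rw [PySem.List.foldl_congr_mem _ _ _ ((0 : Int), ([] : List String)) hstep]
  rw [pv_pair_foldl (List.range cur.length)
    (fun (a : Int) (row : Nat) => a + (pvCnt cur row : Int))
    (fun (b : List String) (row : Nat) => b ++ [String.ofList (pvMask cur row)]) 0 []]
  rw [PySem.List.foldl_add, PySem.List.foldl_append_singleton_eq_map]
  simp

theorem pv_round_removed (cur : List String) :
    (pvRound cur).1 = ((find_accessible_rolls cur).length : Int) := by
  rw [pv_round_eq]
  have hlen : (find_accessible_rolls cur).length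
      = ((List.range cur.length).map (fun row => pvCnt cur row)).sum := by
    rw [pv_findAcc_cells, pv_length_cells, pv_ws_length]
    congr 1
    apply List.map_congr_left
    intro row hrow
    have hrowlt : row < cur.length := List.mem_range.mp hrow
    rw [pv_ws_getD]
    rw [pvCnt, List.countP_eq_length_filter]
    congr 1
    apply List.filter_congr
    intro col hcol
    have hcollt : col < (pvRowChars cur row).length := List.mem_range.mp hcol
    by_cases hmem : (((row : Int), (col : Int)) : Int × Int) ∈ find_accessible_rolls cur
    · have h1 : (pvChr cur row col && fewNbrs (PySem.Set.ofList (rollsOf cur)) (row : Int) (col : Int)) = true := by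
        rw [pv_findAcc_cells, pv_mem_cells] at hmem
        obtain ⟨i, j, hi, hj, hP, hp⟩ := hmem
        rw [Prod.mk.injEq] at hp
        have e1 : row = i := by exact_mod_cast hp.1
        have e2 : col = j := by exact_mod_cast hp.2
        subst e1; subst e2
        exact hP
      rw [h1]
      rw [(PySem.Set.contains_iff _ _).mpr ((PySem.Set.mem_ofList _ _).mpr hmem)]
    · have h2 : PySem.Set.contains (PySem.Set.ofList (find_accessible_rolls cur)) ((row : Int), (col : Int)) = false := by
        rw [← Bool.not_eq_true, PySem.Set.contains_iff, PySem.Set.mem_ofList]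
        exact hmem
      rw [h2]
      by_cases h3 : (pvChr cur row col && fewNbrs (PySem.Set.ofList (rollsOf cur)) (row : Int) (col : Int)) = true
      · exfalso
        apply hmem
        rw [pv_findAcc_cells, pv_mem_cells]
        exact ⟨row, col, by rwa [pv_ws_length], by rwa [pv_ws_getD], h3, rfl⟩
      · simp only [Bool.not_eq_true] at h3
        rw [h3]
  rw [hlen, pv_cast_sum, List.map_map]
  rfl

theorem pv_round_next (cur : List String) :
    rollsOf (pvRound cur).2
      = (rollsOf cur).filter (fun p => !fewNbrs (PySem.Set.ofList (rollsOf cur)) p.1 p.2) := by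
  rw [pv_round_eq]
  set S := PySem.Set.ofList (rollsOf cur) with hS
  have hrowN : ∀ i : Nat, i < cur.length →
      pvRowChars ((List.range cur.length).map (fun (row : Nat) => String.ofList (pvMask cur row))) i = pvMask cur i := by
    intro i hi
    simp [pvRowChars, List.getElem?_map, List.getElem?_range hi]
  have hmasklen : ∀ i : Nat, (pvMask cur i).length = (pvRowChars cur i).length := by
    intro i
    exact pv_setfold_length _ _ _
  have hws : pvWs ((List.range cur.length).map (fun (row : Nat) => String.ofList (pvMask cur row))) = pvWs cur := by
    apply List.ext_getElem
    · simp [pv_ws_length]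
    · intro i h1 h2
      have hi : i < cur.length := by simpa [pv_ws_length] using h2
      simp only [pvWs, List.getElem_map, List.getElem_range]
      rw [String.toList_ofList, hmasklen]
      simp [pvRowChars, List.getElem?_eq_getElem hi]
  rw [pv_rollsOf_eq, hws]
  conv_rhs => rw [pv_rollsOf_eq, pv_filter_cells]
  apply pv_cells_congr
  intro i j hi hj
  rw [pv_ws_length] at hi
  rw [pv_ws_getD] at hj
  have hAtN : pvAtD ((List.range cur.length).map (fun (row : Nat) => String.ofList (pvMask cur row))) i j
      = if PySem.Set.contains (PySem.Set.ofList (find_accessible_rolls cur)) ((i : Int), (j : Int)) = true then '.'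
        else pvAtD cur i j := by
    rw [pvAtD, hrowN i hi, pvMask, pv_setfold_getD]
    by_cases hc : PySem.Set.contains (PySem.Set.ofList (find_accessible_rolls cur)) ((i : Int), (j : Int)) = true
    · rw [if_pos hc, if_pos ⟨List.mem_range.mpr hj, hc, hj⟩]
    · rw [if_neg ?_, if_neg hc]
      · rfl
      · rintro ⟨-, hq, -⟩
        exact hc hq
  by_cases hmem : (((i : Int), (j : Int)) : Int × Int) ∈ find_accessible_rolls cur
  · have hcont : PySem.Set.contains (PySem.Set.ofList (find_accessible_rolls cur)) ((i : Int), (j : Int)) = true :=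
      (PySem.Set.contains_iff _ _).mpr ((PySem.Set.mem_ofList _ _).mpr hmem)
    have hP : (pvChr cur i j && fewNbrs S (i : Int) (j : Int)) = true := by
      rw [pv_findAcc_cells, pv_mem_cells] at hmem
      obtain ⟨i', j', hi', hj', hP', hp'⟩ := hmem
      rw [Prod.mk.injEq] at hp'
      have e1 : i = i' := by exact_mod_cast hp'.1
      have e2 : j = j' := by exact_mod_cast hp'.2
      subst e1; subst e2
      rw [hS]
      exact hP'
    obtain ⟨hchr, hfew⟩ := Bool.and_eq_true _ _ |>.mp hP
    simp only [pvChr]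
    rw [hAtN, if_pos hcont, hfew]
    simp [hchr]
  · have hcont : PySem.Set.contains (PySem.Set.ofList (find_accessible_rolls cur)) ((i : Int), (j : Int)) = false := by
      rw [← Bool.not_eq_true, PySem.Set.contains_iff, PySem.Set.mem_ofList]
      exact hmem
    simp only [pvChr]
    rw [hAtN, if_neg (by rw [hcont]; exact Bool.false_ne_true)]
    by_cases hchr : pvAtD cur i j = '@'
    · have hfew : fewNbrs S (i : Int) (j : Int) = false := by
        cases hfc : fewNbrs S (i : Int) (j : Int)
        · rfl
        · exfalso
          apply hmem
          rw [pv_findAcc_cells, pv_mem_cells]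
          refine ⟨i, j, by rwa [pv_ws_length], by rwa [pv_ws_getD], ?_, rfl⟩
          rw [← hS, hfc]
          simp [pvChr, hchr]
      simp [hchr, hfew]
    · simp [hchr]

theorem pv_loop_eq (fuel : Nat) (cur : List String) (total : Int) :
    pvLoopA fuel cur total = pvPeel fuel (rollsOf cur) total := by
  induction fuel generalizing cur total with
  | zero => rfl
  | succ f ih =>
    simp only [pvLoopA, pvPeel]
    have hrem : (pvRound cur).1 = (((rollsOf cur).filter (fun p => fewNbrs (PySem.Set.ofList (rollsOf cur)) p.1 p.2)).length : Int) := by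
      rw [pv_round_removed, pv_findAcc_eq]
    by_cases hnil : rollsOf cur = []
    · rw [if_pos hnil]
      rw [hrem, hnil]
      simp
    · rw [if_neg hnil]
      have hsplit := pv_filter_split (rollsOf cur) (fun p => fewNbrs (PySem.Set.ofList (rollsOf cur)) p.1 p.2)
      have hAB : (pvRound cur).1
          = ((rollsOf cur).length : Int) - (((rollsOf cur).filter (fun p => !fewNbrs (PySem.Set.ofList (rollsOf cur)) p.1 p.2)).length : Int) := by
        rw [hrem]
        omega
      by_cases hz : (pvRound cur).1 = 0
      · rw [if_pos hz, if_pos (by omega)]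
      · rw [if_neg hz, if_neg (by omega)]
        rw [ih]
        rw [pv_round_next, hAB]

-- ===== VERDICT (by name: the statement is the Claim_ definition above) =====
theorem run_logic_spec : Claim_equal_run_logic := by
  intro data task debug bucket_size _
  unfold Spec_run_logic run_logic run_logic_alt
  split_ifs with h1 h2
  · rw [pv_findAcc_eq]
  · exact pv_loop_eq _ _ _
  · rfl
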